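-- pv_equiv track=rewrite | github.com/myeshco02/podstawy_pr | programy3/7-19.py | f
-- ===== SOURCE A (Python) =====
-- def f(number):
--     number_str = str(number)  # Konwertujemy liczbę na ciąg znaków
--     digit_count = {}  # Słownik do zliczania wystąpień cyfr
--     sum_repeated_digits = 0  # Zmienna do sumowania powtarzających się cyfr
--
--     # Zliczamy wystąpienia każdej cyfry
--     for digit in number_str:
--         if digit in digit_count:
--             digit_count[digit] += 1
--         else:
--             digit_count[digit] = 1
--
--     # Sprawdzamy, które cyfry występują więcej niż raz
--     for digit, count in digit_count.items():
--         if count > 1: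
--             sum_repeated_digits += int(digit) * (count - 1)  # Dodajemy powtarzające się cyfry
--
--     return sum_repeated_digits
-- ===== SOURCE B (Python) =====
-- def f(number):
--     # One pass over str(number): each occurrence of a character after its
--     # first adds int(ch) to the total (int(ch) * (count-1) in aggregate).
--     total = 0
--     seen = set()
--     for ch in str(number):
--         if ch in seen:
--             total += int(ch)
--         else:
--             seen.add(ch)
--     return total
-- ===== Notes on version B (the rewrite author's own statement) =====
-- stated objective: simpler
-- what changed: Replaced the two-phase count-dict-then-scan-items algorithm with a single pass over str(number) that keeps a set of characters already seen and adds int(ch) once per repeat occurrence.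
import Mathlib
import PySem

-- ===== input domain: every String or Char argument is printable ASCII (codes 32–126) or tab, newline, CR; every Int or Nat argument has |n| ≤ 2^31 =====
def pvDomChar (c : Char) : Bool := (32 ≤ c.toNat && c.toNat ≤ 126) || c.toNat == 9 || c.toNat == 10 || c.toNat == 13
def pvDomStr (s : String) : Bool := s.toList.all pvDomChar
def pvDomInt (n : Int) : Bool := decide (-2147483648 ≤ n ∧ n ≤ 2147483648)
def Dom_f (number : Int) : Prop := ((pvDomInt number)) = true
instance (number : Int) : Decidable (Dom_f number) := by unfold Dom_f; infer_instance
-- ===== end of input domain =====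

-- B replaces A's count-dict-plus-second-loop with one pass over str(number)
-- keeping a 'seen' set and adding int(ch) on every repeat occurrence (simpler).

-- int(digit) for a one-char string; the `.getD 0` default is never reached on
-- the claimed inputs: the only non-digit character of str(n) is '-', whose
-- count is 1, so A's `int(digit)` (guarded by count > 1) and B's (guarded by
-- `ch in seen`) are only ever applied to digit characters.
def pvInt1 (c : Char) : Int := (PySem.Int.ofChars? [c]).getD 0

-- ===== PORT A =====
def f (number : Int) : Int :=
  let numberStr := PySem.Int.toChars number
  let digitCount := numberStr.foldl
    (fun d digit =>
      if d.contains digit then d.insert digit (d.getD digit 0 + 1)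
      else d.insert digit 1)
    (PySem.Dict.empty)
  digitCount.items.foldl
    (fun acc p => if p.2 > 1 then acc + pvInt1 p.1 * (p.2 - 1) else acc) 0

-- ===== PORT B =====
def f_alt (number : Int) : Int :=
  ((PySem.Int.toChars number).foldl
    (fun st ch =>
      if PySem.Set.contains st.1 ch then (st.1, st.2 + pvInt1 ch)
      else (PySem.Set.add st.1 ch, st.2))
    ((PySem.Set.empty : PySem.Set Char), (0 : Int))).2

-- ===== PRECONDITION & SPEC =====
def Spec_f (number : Int) (out : Int) : Prop := out = f_alt number
instance (number : Int) (out : Int) : Decidable (Spec_f number out) := by unfold Spec_f; infer_instance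

-- ===== CLAIM (what is proved, stated in full; the proofs are below) =====
def Claim_equal_f : Prop := ∀ (number : Int), Dom_f number → Spec_f number (f number)

-- ===== LEMMAS AND PROOFS =====

-- A's counting loop (if-in-then-+=1-else-=1) is the insert-counter fold.
theorem pv_count_eq_counter (s : List Char) :
    s.foldl (fun d digit =>
      if d.contains digit then d.insert digit (d.getD digit 0 + 1)
      else d.insert digit 1) PySem.Dict.empty = PySem.Dict.counter s := by
  have h : (fun (d : PySem.Dict Char Int) digit =>
      if d.contains digit then d.insert digit (d.getD digit 0 + 1)
      else d.insert digit 1)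
      = fun d x => d.insert x (d.getD x 0 + 1) := by
    funext d x
    by_cases h : d.contains x = true
    · simp [h]
    · simp [eq_false_of_ne_true h, PySem.Dict.getD_of_not_contains d 0 (eq_false_of_ne_true h)]
  rw [h, PySem.Dict.foldl_insert_getD_add_one_eq_counter]

-- sum over a Nodup list of a function changed at one member c
theorem pv_sum_change_one (l : List Char) (hnd : l.Nodup) (c : Char) (hc : c ∈ l)
    (fA fB : Char → Int) (hne : ∀ k ∈ l, k ≠ c → fA k = fB k) :
    (l.map fA).sum = (l.map fB).sum + (fA c - fB c) := by
  induction l with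
  | nil => cases hc
  | cons a t ih =>
    by_cases hca : c = a
    · subst hca
      have hnt : c ∉ t := (List.nodup_cons.mp hnd).1
      have hmap : t.map fA = t.map fB :=
        List.map_congr_left (fun k hk => hne k (List.mem_cons_of_mem _ hk) (fun h => hnt (h ▸ hk)))
      simp [hmap]; ring
    · have hct : c ∈ t := by
        rcases List.mem_cons.mp hc with h | h
        · exact absurd h hca
        · exact h
      have hrec := ih (List.nodup_cons.mp hnd).2 hct
          (fun k hk hkc => hne k (List.mem_cons_of_mem _ hk) hkc)
      have ha : fA a = fB a := hne a (by simp) (fun h => hca h.symm)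
      simp [ha, hrec]; ring

-- the guarded term A sums equals the unguarded product for members of s
theorem pv_term_eq (s : List Char) (k : Char) (hk : k ∈ s) :
    (if ((s.count k : Int)) > 1 then pvInt1 k * ((s.count k : Int) - 1) else 0)
      = pvInt1 k * ((s.count k : Int) - 1) := by
  have h1 : 1 ≤ s.count k := List.one_le_count_iff.mpr hk
  by_cases h : ((s.count k : Int)) > 1
  · simp [h]
  · have : (s.count k : Int) = 1 := by omega
    simp [this]

-- A's value on a char list, in closed summation form
theorem pv_A_sum (s : List Char) :
    ((PySem.Dict.counter s).items.foldl
      (fun acc p => if p.2 > 1 then acc + pvInt1 p.1 * (p.2 - 1) else acc) 0)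
    = ((PySem.Set.ofList s).map (fun k => pvInt1 k * ((s.count k : Int) - 1))).sum := by
  rw [PySem.Dict.items_counter]
  have h : ∀ (L : List Char) (init : Int),
      ((L.map (fun k => (k, (s.count k : Int)))).foldl
        (fun acc p => if p.2 > 1 then acc + pvInt1 p.1 * (p.2 - 1) else acc) init)
      = init + (L.map (fun k => if ((s.count k : Int)) > 1 then pvInt1 k * ((s.count k : Int) - 1) else 0)).sum := by
    intro L
    induction L with
    | nil => simp
    | cons a t ih =>
      intro init
      simp only [List.map_cons, List.foldl_cons, List.sum_cons, ih]
      by_cases h : ((s.count a : Int)) > 1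
      · simp [h]; ring
      · simp [h]
  rw [h]
  have := List.map_congr_left (l := PySem.Set.ofList s)
    (f := fun k => if ((s.count k : Int)) > 1 then pvInt1 k * ((s.count k : Int) - 1) else 0)
    (g := fun k => pvInt1 k * ((s.count k : Int) - 1))
    (fun k hk => pv_term_eq s k ((PySem.Set.mem_ofList s k).mp hk))
  rw [this]; ring

-- B's seen set after processing s is Set.update seen s
theorem pv_B_fst (s : List Char) : ∀ (seen : PySem.Set Char) (t : Int),
    (s.foldl (fun st ch =>
      if PySem.Set.contains st.1 ch then (st.1, st.2 + pvInt1 ch)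
      else (PySem.Set.add st.1 ch, st.2)) (seen, t)).1 = PySem.Set.update seen s := by
  induction s with
  | nil => intro seen t; simp [PySem.Set.update]
  | cons a rest ih =>
    intro seen t
    simp only [List.foldl_cons]
    by_cases h : PySem.Set.contains seen a = true
    · have hm : a ∈ seen := (PySem.Set.contains_iff _ _).mp h
      rw [if_pos h, ih]
      simp [PySem.Set.update, PySem.Set.add, hm]
    · have hm : a ∉ seen := fun m => h ((PySem.Set.contains_iff _ _).mpr m)
      rw [if_neg h, ih]
      simp [PySem.Set.update, PySem.Set.add, hm]

-- the core equivalence on char lists, by induction on the string from the right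
theorem pv_main (s : List Char) :
    ((PySem.Set.ofList s).map (fun k => pvInt1 k * ((s.count k : Int) - 1))).sum
    = (s.foldl (fun st ch =>
        if PySem.Set.contains st.1 ch then (st.1, st.2 + pvInt1 ch)
        else (PySem.Set.add st.1 ch, st.2))
        ((PySem.Set.empty : PySem.Set Char), (0 : Int))).2 := by
  induction s using List.reverseRecOn with
  | nil => simp [PySem.Set.ofList]
  | append_singleton s c ih =>
    rw [List.foldl_append, List.foldl_cons, List.foldl_nil]
    have hfst := pv_B_fst s (PySem.Set.empty) 0
    have hof : PySem.Set.update (PySem.Set.empty) s = PySem.Set.ofList s := by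
      simp [PySem.Set.update, PySem.Set.ofList_eq_foldl, PySem.Set.empty]
    have hofapp : PySem.Set.ofList (s ++ [c]) = PySem.Set.add (PySem.Set.ofList s) c := by
      simp [PySem.Set.ofList_eq_foldl]
    by_cases hc : c ∈ s
    · have hmem : c ∈ PySem.Set.ofList s := by rw [PySem.Set.mem_ofList]; exact hc
      have hcon : PySem.Set.contains (PySem.Set.ofList s) c = true :=
        (PySem.Set.contains_iff _ _).mpr hmem
      rw [hfst, hof, if_pos hcon]
      have hadd : PySem.Set.add (PySem.Set.ofList s) c = PySem.Set.ofList s := by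
        simp [PySem.Set.add, hc]
      rw [hofapp, hadd]
      have hsum := pv_sum_change_one (PySem.Set.ofList s) (PySem.Set.nodup_ofList s) c
        hmem
        (fun k => pvInt1 k * (((s ++ [c]).count k : Int) - 1))
        (fun k => pvInt1 k * ((s.count k : Int) - 1))
        (fun k _ hkc => by simp [List.count_append, Ne.symm hkc])
      rw [hsum, ← ih]
      simp [List.count_append]
      ring
    · have hmem : c ∉ PySem.Set.ofList s := by rw [PySem.Set.mem_ofList]; exact hc
      have hcon : PySem.Set.contains (PySem.Set.ofList s) c = false := by
        rw [← Bool.not_eq_true]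
        exact fun h => hmem ((PySem.Set.contains_iff _ _).mp h)
      rw [hfst, hof, if_neg (by simp [PySem.Set.mem_ofList, hc])]
      have hadd : PySem.Set.add (PySem.Set.ofList s) c = PySem.Set.ofList s ++ [c] := by
        simp [PySem.Set.add, hc]
      rw [hofapp, hadd, List.map_append, List.sum_append, ← ih]
      have hrest : (PySem.Set.ofList s).map (fun k => pvInt1 k * (((s ++ [c]).count k : Int) - 1))
          = (PySem.Set.ofList s).map (fun k => pvInt1 k * ((s.count k : Int) - 1)) := by
        apply List.map_congr_left
        intro k hk
        have hkc : k ≠ c := fun h => hc (h ▸ (PySem.Set.mem_ofList s k).mp hk)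
        simp [List.count_append, Ne.symm hkc]
      rw [hrest]
      simp [List.count_append, List.count_eq_zero_of_not_mem hc]

-- ===== VERDICT (by name: the statement is the Claim_ definition above) =====
theorem f_spec : Claim_equal_f := by
  intro number _
  unfold Spec_f f f_alt
  simp only [pv_count_eq_counter, pv_A_sum, pv_main]
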